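-- pv_equiv track=rewrite | github.com/hectorcb101-lab/clawd-workspace | intelligence-briefing/collectors/collect_ai_articles.py | parse_exa_results
-- ===== SOURCE A (Python) =====
-- def parse_exa_results(output):
--     """Parse Exa output into structured articles."""
--     if not output:
--         return []
--
--     articles = []
--     current = {}
--
--     for line in output.split('\n'):
--         line = line.strip()
--
--         if line.startswith('Title:'):
--             if current and 'title' in current:
--                 articles.append(current)
--             current = {'title': line.replace('Title:', '').strip()}
--
--         elif line.startswith('Author:'):
--             current['author'] = line.replace('Author:', '').strip()
--
--         elif line.startswith('Published Date:'):
--             current['date'] = line.replace('Published Date:', '').strip()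
--
--         elif line.startswith('URL:'):
--             current['url'] = line.replace('URL:', '').strip()
--
--         elif line.startswith('Text:'):
--             current['text'] = line.replace('Text:', '').strip()[:500]
--
--     if current and 'title' in current:
--         articles.append(current)
--
--     return articles
-- ===== SOURCE B (Python) =====
-- PREFIXES = [('Author:', 'author'), ('Published Date:', 'date'), ('URL:', 'url'), ('Text:', 'text')]
--
--
-- def parse_exa_results(output):
--     """Parse Exa output into structured articles."""
--     if not output:
--         return []
--
--     lines = [ln.strip() for ln in output.split('\n')]
--
--     # Pass 1: partition lines into blocks, each starting at a 'Title:' line.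
--     # Lines before the first title belong to no block and are dropped.
--     blocks = []
--     block = None
--     for ln in lines:
--         if ln.startswith('Title:'):
--             if block is not None:
--                 blocks.append(block)
--             block = [ln]
--         elif block is not None:
--             block.append(ln)
--     if block is not None:
--         blocks.append(block)
--
--     # Pass 2: turn each block into an article dict.
--     articles = []
--     for blk in blocks:
--         art = {'title': blk[0].replace('Title:', '').strip()}
--         for ln in blk[1:]:
--             for pre, key in PREFIXES:
--                 if ln.startswith(pre):
--                     val = ln.replace(pre, '').strip()
--                     art[key] = val[:500] if key == 'text' else val
--                     break
--         articles.append(art)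
--     return articles
-- ===== Notes on version B (the rewrite author's own statement) =====
-- stated objective: alternative
-- what changed: A is a single stateful pass threading a partially built article dict with a duplicated emit condition; B first segments the stripped lines into Title-headed blocks, then independently converts each block to a dict via a prefix table.
import Mathlib
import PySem

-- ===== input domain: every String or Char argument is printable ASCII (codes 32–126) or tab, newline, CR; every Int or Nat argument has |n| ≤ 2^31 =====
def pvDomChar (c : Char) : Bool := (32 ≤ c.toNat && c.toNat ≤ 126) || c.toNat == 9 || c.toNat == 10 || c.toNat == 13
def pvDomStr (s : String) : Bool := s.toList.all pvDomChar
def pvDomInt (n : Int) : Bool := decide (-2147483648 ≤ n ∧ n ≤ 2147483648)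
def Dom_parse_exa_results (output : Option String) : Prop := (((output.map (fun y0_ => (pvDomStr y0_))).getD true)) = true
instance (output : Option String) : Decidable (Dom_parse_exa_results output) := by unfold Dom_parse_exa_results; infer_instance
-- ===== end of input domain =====

-- ===== PORT A =====
-- B restructures A's single stateful pass into block segmentation + per-block conversion (objective: alternative).
-- Python dicts are ported as PySem.Dict and returned as their items lists (insertion order, overwrite in place).

-- 'if current and 'title' in current: articles.append(current)' (appears twice in A)
def pvEmitA (arts : List (PySem.Dict String String)) (cur : PySem.Dict String String) :
    List (PySem.Dict String String) :=
  if cur.items ≠ [] ∧ cur.contains "title" then arts ++ [cur] else arts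

-- one iteration of A's for-loop: strip the line, then the if/elif chain
def pvStepA (st : List (PySem.Dict String String) × PySem.Dict String String) (line0 : String) :
    List (PySem.Dict String String) × PySem.Dict String String :=
  let line := PySem.Str.strip line0
  if PySem.Str.startswith line "Title:" then
    (pvEmitA st.1 st.2,
     PySem.Dict.empty.insert "title" (PySem.Str.strip (PySem.Str.replace line "Title:" "")))
  else if PySem.Str.startswith line "Author:" then
    (st.1, st.2.insert "author" (PySem.Str.strip (PySem.Str.replace line "Author:" "")))
  else if PySem.Str.startswith line "Published Date:" then
    (st.1, st.2.insert "date" (PySem.Str.strip (PySem.Str.replace line "Published Date:" "")))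
  else if PySem.Str.startswith line "URL:" then
    (st.1, st.2.insert "url" (PySem.Str.strip (PySem.Str.replace line "URL:" "")))
  else if PySem.Str.startswith line "Text:" then
    (st.1, st.2.insert "text"
      (PySem.Str.slice (PySem.Str.strip (PySem.Str.replace line "Text:" "")) none (some 500)))
  else st

def parse_exa_results (output : Option String) : List (List (String × String)) :=
  match output with
  | none => []
  | some s =>
    if s = "" then []      -- 'if not output: return []' (None or empty string)
    else
      -- s.split('\n'): sep ≠ "" so split? is always some; getD [] is unreachable
      let st := ((PySem.Str.split? s "\n").getD []).foldl pvStepA ([], PySem.Dict.empty)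
      (pvEmitA st.1 st.2).map (·.items)

-- ===== PORT B =====
def pvPrefixes : List (String × String) :=
  [("Author:", "author"), ("Published Date:", "date"), ("URL:", "url"), ("Text:", "text")]

-- pass 1: B's segmentation loop; 'block' is the Option accumulator, 'acc' the blocks list
def pvSeg : List String → Option (List String) → List (List String) → List (List String)
  | [], none, acc => acc
  | [], some blk, acc => acc ++ [blk]
  | ln :: rest, cur?, acc =>
    if PySem.Str.startswith ln "Title:" then
      match cur? with
      | none => pvSeg rest (some [ln]) acc
      | some blk => pvSeg rest (some [ln]) (acc ++ [blk])
    else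
      match cur? with
      | none => pvSeg rest none acc
      | some blk => pvSeg rest (some (blk ++ [ln])) acc

-- B's inner 'for pre, key in PREFIXES: … break' loop
def pvApplyPrefix (art : PySem.Dict String String) (ln : String) :
    List (String × String) → PySem.Dict String String
  | [] => art
  | (pre, key) :: rest =>
    if PySem.Str.startswith ln pre then
      let v := PySem.Str.strip (PySem.Str.replace ln pre "")
      art.insert key (if key == "text" then PySem.Str.slice v none (some 500) else v)
    else pvApplyPrefix art ln rest

-- pass 2: one block -> one article dict (blocks produced by pvSeg are never empty)
def pvParseBlock (blk : List String) : PySem.Dict String String :=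
  match blk with
  | [] => PySem.Dict.empty
  | t :: rest =>
    rest.foldl (fun art ln => pvApplyPrefix art ln pvPrefixes)
      (PySem.Dict.empty.insert "title" (PySem.Str.strip (PySem.Str.replace t "Title:" "")))

def parse_exa_results_alt (output : Option String) : List (List (String × String)) :=
  match output with
  | none => []
  | some s =>
    if s = "" then []
    else
      let lines := ((PySem.Str.split? s "\n").getD []).map PySem.Str.strip
      (pvSeg lines none []).map (fun blk => (pvParseBlock blk).items)

-- ===== PRECONDITION & SPEC =====
def Spec_parse_exa_results (output : Option String) (out : List (List (String × String))) : Prop := out = parse_exa_results_alt output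
instance (output : Option String) (out : List (List (String × String))) : Decidable (Spec_parse_exa_results output out) := by unfold Spec_parse_exa_results; infer_instance

-- ===== CLAIM (what is proved, stated in full; the proofs are below) =====
def Claim_equal_parse_exa_results : Prop := ∀ (output : Option String), Dom_parse_exa_results output → Spec_parse_exa_results output (parse_exa_results output)

-- ===== LEMMAS AND PROOFS =====

-- pvSeg's blocks accumulator is a pure prefix
theorem pvSeg_acc (l : List String) (cur? : Option (List String)) (acc : List (List String)) :
    pvSeg l cur? acc = acc ++ pvSeg l cur? [] := by
  induction l generalizing cur? acc with
  | nil => cases cur? <;> simp [pvSeg]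
  | cons x xs ih =>
    cases cur? with
    | none =>
      by_cases h : PySem.Str.startswith x "Title:" = true
      · simp only [pvSeg]
        rw [if_pos h, if_pos h]
        exact ih (some [x]) acc
      · simp only [pvSeg]
        rw [if_neg (by simpa using h), if_neg (by simpa using h)]
        exact ih none acc
    | some blk =>
      by_cases h : PySem.Str.startswith x "Title:" = true
      · simp only [pvSeg]
        rw [if_pos h, if_pos h]
        rw [ih (some [x]) (acc ++ [blk]), ih (some [x]) ([] ++ [blk])]
        simp
      · simp only [pvSeg]
        rw [if_neg (by simpa using h), if_neg (by simpa using h)]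
        exact ih (some (blk ++ [x])) acc

-- one unfolding of pvSeg on a Title line with no open block
theorem pvSeg_cons_title_none (x : String) (xs : List String)
    (acc : List (List String)) (h : PySem.Str.startswith x "Title:" = true) :
    pvSeg (x :: xs) none acc = pvSeg xs (some [x]) acc := by
  simp only [pvSeg]; rw [if_pos h]

-- one unfolding of pvSeg on a non-Title line with no open block
theorem pvSeg_cons_not_title_none (x : String) (xs : List String)
    (acc : List (List String)) (h : PySem.Str.startswith x "Title:" = false) :
    pvSeg (x :: xs) none acc = pvSeg xs none acc := by
  simp only [pvSeg]; rw [if_neg (by simpa using h)]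

-- one unfolding of pvSeg on a Title line with an open block
theorem pvSeg_cons_title (x : String) (xs : List String) (blk : List String)
    (acc : List (List String)) (h : PySem.Str.startswith x "Title:" = true) :
    pvSeg (x :: xs) (some blk) acc = pvSeg xs (some [x]) (acc ++ [blk]) := by
  simp only [pvSeg]; rw [if_pos h]

-- one unfolding of pvSeg on a non-Title line
theorem pvSeg_cons_not_title (x : String) (xs : List String) (blk : List String)
    (acc : List (List String)) (h : PySem.Str.startswith x "Title:" = false) :
    pvSeg (x :: xs) (some blk) acc = pvSeg xs (some (blk ++ [x])) acc := by
  simp only [pvSeg]; rw [if_neg (by simpa using h)]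

-- the prefix table never touches the "title" key
theorem contains_title_applyPrefix (art : PySem.Dict String String) (ln : String) :
    (pvApplyPrefix art ln pvPrefixes).contains "title" = art.contains "title" := by
  simp only [pvPrefixes, pvApplyPrefix]
  split_ifs <;> simp [PySem.Dict.contains_insert]

-- a dict that contains a key has a nonempty items list
theorem items_ne_nil_of_contains (d : PySem.Dict String String)
    (h : d.contains "title" = true) : d.items ≠ [] := by
  rw [PySem.Dict.contains_iff_mem_keys] at h
  intro he
  simp only [PySem.Dict.keys, he, List.map_nil] at h
  exact (List.not_mem_nil) h

theorem contains_title_parseBlock (t : String) (bs : List String) :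
    (pvParseBlock (t :: bs)).contains "title" = true := by
  simp only [pvParseBlock]
  induction bs using List.reverseRecOn with
  | nil => simp [PySem.Dict.contains_insert_self]
  | append_singleton bs x ih => rw [List.foldl_append, List.foldl_cons, List.foldl_nil,
      contains_title_applyPrefix]; exact ih

theorem emitA_of_title (arts : List (PySem.Dict String String)) (t : String) (bs : List String) :
    pvEmitA arts (pvParseBlock (t :: bs)) = arts ++ [pvParseBlock (t :: bs)] := by
  rw [pvEmitA, if_pos]
  exact ⟨items_ne_nil_of_contains _ (contains_title_parseBlock t bs),
    contains_title_parseBlock t bs⟩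

theorem emitA_of_no_title (arts : List (PySem.Dict String String))
    (cur : PySem.Dict String String) (hc : cur.contains "title" = false) :
    pvEmitA arts cur = arts := by
  rw [pvEmitA, if_neg]
  intro hcon; rw [hc] at hcon; exact absurd hcon.2 (by simp)

-- a non-Title step of A is exactly B's prefix-table update
theorem stepA_not_title (st : List (PySem.Dict String String) × PySem.Dict String String)
    (x : String) (h : PySem.Str.startswith (PySem.Str.strip x) "Title:" = false) :
    pvStepA st x = (st.1, pvApplyPrefix st.2 (PySem.Str.strip x) pvPrefixes) := by
  simp only [pvStepA, pvApplyPrefix, pvPrefixes]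
  rw [if_neg (by simpa using h)]
  by_cases h1 : PySem.Str.startswith (PySem.Str.strip x) "Author:" = true
  · rw [if_pos h1, if_pos h1]; rfl
  rw [if_neg h1, if_neg h1]
  by_cases h2 : PySem.Str.startswith (PySem.Str.strip x) "Published Date:" = true
  · rw [if_pos h2, if_pos h2]; rfl
  rw [if_neg h2, if_neg h2]
  by_cases h3 : PySem.Str.startswith (PySem.Str.strip x) "URL:" = true
  · rw [if_pos h3, if_pos h3]; rfl
  rw [if_neg h3, if_neg h3]
  by_cases h4 : PySem.Str.startswith (PySem.Str.strip x) "Text:" = true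
  · rw [if_pos h4, if_pos h4]; rfl
  rw [if_neg h4, if_neg h4]

-- a Title step of A emits and restarts with B's one-line block dict
theorem stepA_title (st : List (PySem.Dict String String) × PySem.Dict String String)
    (x : String) (h : PySem.Str.startswith (PySem.Str.strip x) "Title:" = true) :
    pvStepA st x = (pvEmitA st.1 st.2, pvParseBlock [PySem.Str.strip x]) := by
  simp only [pvStepA, pvParseBlock, List.foldl_nil]
  rw [if_pos h]

-- main invariant, open-block phase: A's loop from a title-headed current dict
theorem runA_in (l : List String) :
    ∀ (arts : List (PySem.Dict String String)) (t : String) (bs : List String),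
    PySem.Str.startswith t "Title:" = true →
    (let st := l.foldl pvStepA (arts, pvParseBlock (t :: bs))
     pvEmitA st.1 st.2) =
      arts ++ (pvSeg (l.map PySem.Str.strip) (some (t :: bs)) []).map pvParseBlock := by
  induction l with
  | nil =>
    intro arts t bs _
    simp only [List.foldl_nil, List.map_nil, pvSeg]
    rw [emitA_of_title]
    simp
  | cons x xs ih =>
    intro arts t bs ht
    by_cases h : PySem.Str.startswith (PySem.Str.strip x) "Title:" = true
    · simp only [List.foldl_cons, stepA_title _ _ h, emitA_of_title]
      have := ih (arts ++ [pvParseBlock (t :: bs)]) (PySem.Str.strip x) [] h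
      simp only at this ⊢
      rw [this, List.map_cons, pvSeg_cons_title _ _ _ _ h, List.nil_append,
        pvSeg_acc (xs.map PySem.Str.strip) (some [PySem.Str.strip x]) [t :: bs]]
      simp
    · have hb : PySem.Str.startswith (PySem.Str.strip x) "Title:" = false := by
        simpa using h
      simp only [List.foldl_cons, stepA_not_title _ _ hb]
      have hup : pvApplyPrefix (pvParseBlock (t :: bs)) (PySem.Str.strip x) pvPrefixes =
          pvParseBlock (t :: (bs ++ [PySem.Str.strip x])) := by
        simp [pvParseBlock, List.foldl_append]
      rw [hup]
      have := ih arts t (bs ++ [PySem.Str.strip x]) ht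
      simp only at this ⊢
      rw [this, List.map_cons, pvSeg_cons_not_title _ _ _ _ hb, List.cons_append]

-- main invariant, no-open-block phase: A's loop from a title-free current dict
theorem runA_out (l : List String) :
    ∀ (arts : List (PySem.Dict String String)) (cur : PySem.Dict String String),
    cur.contains "title" = false →
    (let st := l.foldl pvStepA (arts, cur)
     pvEmitA st.1 st.2) =
      arts ++ (pvSeg (l.map PySem.Str.strip) none []).map pvParseBlock := by
  induction l with
  | nil =>
    intro arts cur hc
    simp only [List.foldl_nil, List.map_nil, pvSeg]
    rw [emitA_of_no_title _ _ hc]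
    simp
  | cons x xs ih =>
    intro arts cur hc
    by_cases h : PySem.Str.startswith (PySem.Str.strip x) "Title:" = true
    · simp only [List.foldl_cons, stepA_title _ _ h, emitA_of_no_title _ _ hc]
      have := runA_in xs arts (PySem.Str.strip x) [] h
      simp only at this ⊢
      rw [this, List.map_cons, pvSeg_cons_title_none _ _ _ h]
    · have hb : PySem.Str.startswith (PySem.Str.strip x) "Title:" = false := by
        simpa using h
      simp only [List.foldl_cons, stepA_not_title _ _ hb]
      have := ih arts (pvApplyPrefix cur (PySem.Str.strip x) pvPrefixes)
        (by rw [contains_title_applyPrefix]; exact hc)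
      simp only at this ⊢
      rw [this, List.map_cons, pvSeg_cons_not_title_none _ _ _ hb]

-- ===== VERDICT (by name: the statement is the Claim_ definition above) =====
theorem parse_exa_results_spec : Claim_equal_parse_exa_results := by
  intro output _
  unfold Spec_parse_exa_results parse_exa_results parse_exa_results_alt
  cases output with
  | none => rfl
  | some s =>
    by_cases hs : s = ""
    · simp [hs]
    · simp only [hs, if_false]
      have := runA_out ((PySem.Str.split? s "\n").getD []) [] PySem.Dict.empty
        (by simp [PySem.Dict.contains_empty])
      simp only at this
      rw [this]
      simp [Function.comp]
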